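-- pv_equiv track=rewrite | github.com/Survivor538/4D-Miner-AutoBuilder | ver_0_30/structure.py | get_column_map
-- ===== SOURCE A (Python) =====
-- def get_column_map(structure: set[tuple[int, int, int, int]]) -> dict[tuple[int, int, int], list[int]]:
--     result = {}
--     for x, y, z, w in structure:
--         key = (x, z, w)
--         result.setdefault(key, []).append(y)
--
--     for key in result:
--         result[key] = sorted(set(result[key]))
--
--     return result
-- ===== SOURCE B (Python) =====
-- def _insert_sorted_unique(ys, y):
--     # insert y into the sorted, duplicate-free list ys, keeping both invariants
--     out = []
--     for i, a in enumerate(ys):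
--         if a < y:
--             out.append(a)
--         elif a == y:
--             return ys
--         else:
--             out.append(y)
--             out.extend(ys[i:])
--             return out
--     out.append(y)
--     return out
--
-- def get_column_map(structure):
--     result = {}
--     for x, y, z, w in structure:
--         key = (x, z, w)
--         bucket = result.get(key)
--         if bucket is None:
--             result[key] = [y]
--         else:
--             result[key] = _insert_sorted_unique(bucket, y)
--     return result
-- ===== Notes on version B (the rewrite author's own statement) =====
-- stated objective: alternative
-- what changed: A appends every y to its bucket and then runs a second pass applying sorted(set(...)) to each bucket; B does a single pass that keeps every bucket sorted and duplicate-free at all times via an ordered insertion that skips duplicates, so the second pass, the set() dedup and the sort disappear.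
import Mathlib
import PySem

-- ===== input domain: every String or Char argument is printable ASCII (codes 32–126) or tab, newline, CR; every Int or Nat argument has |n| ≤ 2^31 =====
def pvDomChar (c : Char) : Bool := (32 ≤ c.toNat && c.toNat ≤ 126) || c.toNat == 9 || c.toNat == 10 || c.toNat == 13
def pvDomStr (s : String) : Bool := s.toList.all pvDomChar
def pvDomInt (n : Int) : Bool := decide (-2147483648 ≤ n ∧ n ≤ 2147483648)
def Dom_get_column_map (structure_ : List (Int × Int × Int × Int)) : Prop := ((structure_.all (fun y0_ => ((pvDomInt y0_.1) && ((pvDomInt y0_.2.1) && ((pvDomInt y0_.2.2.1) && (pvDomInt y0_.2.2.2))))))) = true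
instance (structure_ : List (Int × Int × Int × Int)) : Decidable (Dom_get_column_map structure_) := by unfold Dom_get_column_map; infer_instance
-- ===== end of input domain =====

-- B replaces A's append-then-(sorted∘set)-each-bucket second pass by a single pass that keeps
-- every bucket sorted and duplicate-free via an ordered duplicate-skipping insertion (objective: alternative).
-- Both return values only; the Python input is a set, modelled as a list of its elements.

-- ===== PORT A =====
def get_column_map (structure_ : List (Int × Int × Int × Int)) : List (Int × Int × Int × List Int) :=
  let result : PySem.Dict (Int × Int × Int) (List Int) :=
    structure_.foldl (fun d p =>
      -- result.setdefault(key, []).append(y)  ==  result[key] = result.get(key, []) + [y]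
      d.modify (p.1, p.2.2.1, p.2.2.2) [] (fun ys => ys ++ [p.2.1])) PySem.Dict.empty
  -- for key in result: result[key] = sorted(set(result[key]))  (in-place overwrite keeps positions)
  let result2 : PySem.Dict (Int × Int × Int) (List Int) :=
    PySem.Dict.mk (result.items.map (fun kv => (kv.1, PySem.List.sorted (PySem.Set.ofList kv.2) (fun v => v))))
  result2.items.map (fun kv => (kv.1.1, kv.1.2.1, kv.1.2.2, kv.2))

-- ===== PORT B =====
-- _insert_sorted_unique(ys, y): walk ys, keep elements < y, drop the insertion if y is found,
-- otherwise splice y in front of the remaining tail (direct recursion over the traversal).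
def insertSortedUnique (y : Int) : List Int → List Int
  | [] => [y]
  | a :: rest =>
    if a < y then a :: insertSortedUnique y rest
    else if a = y then a :: rest
    else y :: a :: rest

def get_column_map_alt (structure_ : List (Int × Int × Int × Int)) : List (Int × Int × Int × List Int) :=
  let result : PySem.Dict (Int × Int × Int) (List Int) :=
    structure_.foldl (fun d p =>
      match d.get? (p.1, p.2.2.1, p.2.2.2) with
      | none => d.insert (p.1, p.2.2.1, p.2.2.2) [p.2.1]
      | some b => d.insert (p.1, p.2.2.1, p.2.2.2) (insertSortedUnique p.2.1 b)) PySem.Dict.empty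
  result.items.map (fun kv => (kv.1.1, kv.1.2.1, kv.1.2.2, kv.2))

-- ===== PRECONDITION & SPEC =====
def Spec_get_column_map (structure_ : List (Int × Int × Int × Int)) (out : List (Int × Int × Int × List Int)) : Prop := out = get_column_map_alt structure_
instance (structure_ : List (Int × Int × Int × Int)) (out : List (Int × Int × Int × List Int)) : Decidable (Spec_get_column_map structure_ out) := by unfold Spec_get_column_map; infer_instance

-- ===== CLAIM (what is proved, stated in full; the proofs are below) =====
def Claim_equal_get_column_map : Prop := ∀ (structure_ : List (Int × Int × Int × Int)), Dom_get_column_map structure_ → Spec_get_column_map structure_ (get_column_map structure_)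

-- ===== LEMMAS AND PROOFS =====

-- sorted(set(v)) with the identity key, A's bucket normal form
def pvSS (v : List Int) : List Int := PySem.List.sorted (PySem.Set.ofList v) (fun x => x)

theorem mem_insertSortedUnique (y z : Int) (s : List Int) :
    z ∈ insertSortedUnique y s ↔ z = y ∨ z ∈ s := by
  induction s with
  | nil => simp [insertSortedUnique]
  | cons a rest ih =>
    simp only [insertSortedUnique]
    split_ifs with h1 h2
    · simp only [List.mem_cons, ih]; tauto
    · subst h2; simp only [List.mem_cons]; tauto
    · simp only [List.mem_cons]

theorem insertSortedUnique_of_mem (y : Int) (s : List Int)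
    (hs : s.Pairwise (· < ·)) (hy : y ∈ s) : insertSortedUnique y s = s := by
  induction s with
  | nil => cases hy
  | cons a rest ih =>
    rcases List.pairwise_cons.1 hs with ⟨ha, hrest⟩
    simp only [insertSortedUnique]
    split_ifs with h1 h2
    · have hyr : y ∈ rest := by
        rcases List.mem_cons.1 hy with h | h
        · omega
        · exact h
      rw [ih hrest hyr]
    · rfl
    · exfalso
      rcases List.mem_cons.1 hy with h | h
      · omega
      · have := ha y h; omega

theorem insertSortedUnique_perm (y : Int) (s : List Int) (hy : y ∉ s) :
    (insertSortedUnique y s).Perm (s ++ [y]) := by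
  induction s with
  | nil => simp [insertSortedUnique]
  | cons a rest ih =>
    have hyr : y ∉ rest := fun h => hy (List.mem_cons_of_mem _ h)
    simp only [insertSortedUnique]
    split_ifs with h1 h2
    · exact List.Perm.cons a (ih hyr)
    · exact absurd (h2 ▸ List.mem_cons_self) hy
    · calc (y :: a :: rest).Perm ((a :: rest) ++ [y]) := by
            simpa using (List.perm_append_comm (l₁ := [y]) (l₂ := a :: rest))

theorem insertSortedUnique_pairwise (y : Int) (s : List Int)
    (hs : s.Pairwise (· < ·)) (hy : y ∉ s) :
    (insertSortedUnique y s).Pairwise (· < ·) := by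
  induction s with
  | nil => simp [insertSortedUnique]
  | cons a rest ih =>
    rcases List.pairwise_cons.1 hs with ⟨ha, hrest⟩
    have hyr : y ∉ rest := fun h => hy (List.mem_cons_of_mem _ h)
    simp only [insertSortedUnique]
    split_ifs with h1 h2
    · refine List.pairwise_cons.2 ⟨?_, ih hrest hyr⟩
      intro z hz
      rcases (mem_insertSortedUnique y z rest).1 hz with rfl | hzr
      · exact h1
      · exact ha z hzr
    · exact absurd (h2 ▸ List.mem_cons_self) hy
    · have hya : y < a := by omega
      refine List.pairwise_cons.2 ⟨?_, hs⟩
      intro z hz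
      rcases List.mem_cons.1 hz with rfl | hzr
      · exact hya
      · exact lt_trans hya (ha z hzr)

-- the crux: ordered duplicate-skipping insertion into sorted(set(b)) IS sorted(set(b ++ [y]))
theorem insertSortedUnique_pvSS (y : Int) (b : List Int) :
    insertSortedUnique y (pvSS b) = pvSS (b ++ [y]) := by
  have hpair : (pvSS b).Pairwise (· < ·) := PySem.List.sorted_ofList_pairwise_lt b
  have hofl : PySem.Set.ofList (b ++ [y]) = PySem.Set.add (PySem.Set.ofList b) y := by
    rw [PySem.Set.ofList_eq_foldl, PySem.Set.ofList_eq_foldl, List.foldl_append]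
    rfl
  by_cases hy : y ∈ b
  · have hmem : y ∈ PySem.Set.ofList b := (PySem.Set.mem_ofList b y).2 hy
    have hadd : PySem.Set.add (PySem.Set.ofList b) y = PySem.Set.ofList b := by
      unfold PySem.Set.add
      simp [PySem.Set.contains, hmem]
    have hys : y ∈ pvSS b := by
      unfold pvSS
      rw [PySem.List.mem_sorted]
      exact hmem
    rw [insertSortedUnique_of_mem y _ hpair hys]
    unfold pvSS
    rw [hofl, hadd]
  · have hmem : y ∉ PySem.Set.ofList b := fun h => hy ((PySem.Set.mem_ofList b y).1 h)
    have hadd : PySem.Set.add (PySem.Set.ofList b) y = PySem.Set.ofList b ++ [y] := by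
      unfold PySem.Set.add
      simp [PySem.Set.contains, hmem]
    have hys : y ∉ pvSS b := by
      unfold pvSS
      rw [PySem.List.mem_sorted]
      exact hmem
    have hperm : (insertSortedUnique y (pvSS b)).Perm (PySem.Set.ofList b ++ [y]) := by
      refine (insertSortedUnique_perm y (pvSS b) hys).trans ?_
      exact List.Perm.append_right [y] (PySem.List.sorted_perm _ _ _)
    unfold pvSS
    rw [hofl, hadd]
    exact (PySem.List.sorted_eq_of_perm_of_pairwise_lt _ _ _ hperm
      (insertSortedUnique_pairwise y _ hpair hys)).symm

-- entrywise relation between the two accumulated dicts: B's items = A's items with pvSS on values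
def pvRel (dA dB : PySem.Dict (Int × Int × Int) (List Int)) : Prop :=
  dB.items = dA.items.map (fun kv => (kv.1, pvSS kv.2))

theorem pvRel_get? (dA dB : PySem.Dict (Int × Int × Int) (List Int)) (h : pvRel dA dB)
    (k : Int × Int × Int) : dB.get? k = (dA.get? k).map pvSS := by
  unfold PySem.Dict.get?
  rw [h, List.find?_map]
  have hpred : ((fun p : (Int × Int × Int) × List Int => p.1 == k) ∘
      (fun kv : (Int × Int × Int) × List Int => (kv.1, pvSS kv.2))) = fun p => p.1 == k := rfl
  rw [hpred]
  cases List.find? (fun p => p.1 == k) dA.items <;> rfl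

theorem pvRel_contains (dA dB : PySem.Dict (Int × Int × Int) (List Int)) (h : pvRel dA dB)
    (k : Int × Int × Int) : dB.contains k = dA.contains k := by
  unfold PySem.Dict.contains
  rw [h, List.any_map]
  rfl

theorem pvRel_step (dA dB : PySem.Dict (Int × Int × Int) (List Int)) (h : pvRel dA dB)
    (p : Int × Int × Int × Int) :
    pvRel (dA.modify (p.1, p.2.2.1, p.2.2.2) [] (fun ys => ys ++ [p.2.1]))
      (match dB.get? (p.1, p.2.2.1, p.2.2.2) with
       | none => dB.insert (p.1, p.2.2.1, p.2.2.2) [p.2.1]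
       | some b => dB.insert (p.1, p.2.2.1, p.2.2.2) (insertSortedUnique p.2.1 b)) := by
  set k := (p.1, p.2.2.1, p.2.2.2) with hk
  have hget := pvRel_get? dA dB h k
  have hcon := pvRel_contains dA dB h k
  cases hA : dA.get? k with
  | none =>
    have hB : dB.get? k = none := by rw [hget, hA]; rfl
    have hcA : dA.contains k = false := by
      unfold PySem.Dict.contains
      unfold PySem.Dict.get? at hA
      rcases hfind : List.find? (fun q => q.1 == k) dA.items with _ | v
      · simpa [List.any_eq_false, -beq_iff_eq] using fun p hp => List.find?_eq_none.mp hfind p hp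
      · rw [hfind] at hA; simp at hA
    have hcB : dB.contains k = false := by rw [hcon, hcA]
    rw [hB]
    unfold pvRel PySem.Dict.insert PySem.Dict.modify PySem.Dict.insert PySem.Dict.getD
    rw [hA, hcA, hcB]
    simp only [Bool.false_eq_true, if_false]
    rw [h]
    simp only [List.map_append, List.map_cons, List.map_nil]
    rfl
  | some b =>
    have hB : dB.get? k = some (pvSS b) := by rw [hget, hA]; rfl
    have hcA : dA.contains k = true := by
      unfold PySem.Dict.contains
      unfold PySem.Dict.get? at hA
      rcases hfind : List.find? (fun q => q.1 == k) dA.items with _ | v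
      · rw [hfind] at hA; simp at hA
      · have hv := List.find?_some hfind
        exact List.any_eq_true.2 ⟨v, List.mem_of_find?_eq_some hfind, hv⟩
    have hcB : dB.contains k = true := by rw [hcon, hcA]
    rw [hB]
    unfold pvRel PySem.Dict.insert PySem.Dict.modify PySem.Dict.insert PySem.Dict.getD
    rw [hA, hcA, hcB]
    simp only [if_true]
    rw [h, List.map_map, List.map_map]
    apply List.map_congr_left
    intro kv _
    by_cases hkv : kv.1 == k
    · simp [Function.comp, hkv, insertSortedUnique_pvSS]
    · simp [Function.comp, hkv]

theorem pvRel_foldl (l : List (Int × Int × Int × Int)) :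
    ∀ (dA dB : PySem.Dict (Int × Int × Int) (List Int)), pvRel dA dB →
    pvRel (l.foldl (fun d p => d.modify (p.1, p.2.2.1, p.2.2.2) [] (fun ys => ys ++ [p.2.1])) dA)
      (l.foldl (fun d p =>
        match d.get? (p.1, p.2.2.1, p.2.2.2) with
        | none => d.insert (p.1, p.2.2.1, p.2.2.2) [p.2.1]
        | some b => d.insert (p.1, p.2.2.1, p.2.2.2) (insertSortedUnique p.2.1 b)) dB) := by
  induction l with
  | nil => intro dA dB h; exact h
  | cons p rest ih =>
    intro dA dB h
    exact ih _ _ (pvRel_step dA dB h p)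

-- ===== VERDICT (by name: the statement is the Claim_ definition above) =====
theorem get_column_map_spec : Claim_equal_get_column_map := by
  intro structure_ _
  unfold Spec_get_column_map get_column_map get_column_map_alt
  have h := pvRel_foldl structure_ PySem.Dict.empty PySem.Dict.empty rfl
  unfold pvRel at h
  simp only []
  rw [h]
  simp only [List.map_map]
  apply List.map_congr_left
  intro kv _
  rfl
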